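-- pv_equiv track=rewrite | github.com/MilanRadeta/MITOpenCourseware6.x | 6.s095/02/partysmart2.py | chooseTime
-- ===== SOURCE A (Python) =====
-- def chooseTime(times, ystart = 0, yend = 24):
--
--     rcount = 0
--     maxcount = 0
--     time = 0
--
--     # Range through the times computing a running count of celebrities
--     for t in times:
--         rcount += 1 if t[1] == 'start' else -1
--         if rcount > maxcount and ystart <= t[0] < yend:
--             maxcount = rcount
--             time = t[0]
--
--     return maxcount, time
-- ===== SOURCE B (Python) =====
-- def chooseTime(times, ystart=0, yend=24):
--     # Pass 1: prefix-sum table of +1/-1 deltas (running overlap count per event).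
--     counts = []
--     c = 0
--     for _, kind in times:
--         c += 1 if kind == 'start' else -1
--         counts.append(c)
--     # Pass 2: pair counts with in-window event times, take the max count
--     # (earliest occurrence on ties, matching the strict-> semantics of the loop).
--     window = [(cnt, t) for (t, _), cnt in zip(times, counts) if ystart <= t < yend]
--     best = max((cnt for cnt, _ in window), default=0)
--     if best <= 0:
--         return 0, 0
--     time = next(t for cnt, t in window if cnt == best)
--     return best, time
-- ===== Notes on version B (the rewrite author's own statement) =====
-- stated objective: alternative
-- what changed: A tracks the max inside one stateful loop; B first materialises the running-count prefix-sum table, then in a second differently-shaped pass pairs counts with in-window event times and picks the maximum count (earliest time on ties), defaulting to (0,0) when nothing positive is in window.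
import Mathlib
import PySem

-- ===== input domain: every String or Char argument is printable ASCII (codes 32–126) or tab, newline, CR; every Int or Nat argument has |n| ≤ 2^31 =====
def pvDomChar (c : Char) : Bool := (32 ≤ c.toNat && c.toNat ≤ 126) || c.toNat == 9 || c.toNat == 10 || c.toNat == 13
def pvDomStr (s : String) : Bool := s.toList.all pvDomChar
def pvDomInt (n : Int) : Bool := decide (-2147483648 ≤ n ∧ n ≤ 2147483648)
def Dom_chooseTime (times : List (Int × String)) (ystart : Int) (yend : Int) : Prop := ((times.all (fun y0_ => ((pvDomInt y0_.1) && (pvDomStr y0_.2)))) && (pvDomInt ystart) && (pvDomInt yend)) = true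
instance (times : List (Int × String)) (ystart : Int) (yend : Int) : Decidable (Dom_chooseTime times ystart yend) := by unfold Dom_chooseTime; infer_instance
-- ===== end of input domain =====

-- B replaces A's single stateful max-tracking loop by a prefix-sum counts table plus a
-- separate max/earliest-selection pass over the in-window pairs (alternative decomposition).


-- ===== PORT A =====
-- literal transliteration: one loop with state (rcount, maxcount, time)
def chooseTime (times : List (Int × String)) (ystart : Int) (yend : Int) : Int × Int :=
  let st := times.foldl
    (fun (s : Int × Int × Int) t =>
      let rcount := s.1 + (if t.2 == "start" then 1 else -1)
      if rcount > s.2.1 ∧ (ystart ≤ t.1 ∧ t.1 < yend) then (rcount, rcount, t.1)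
      else (rcount, s.2.1, s.2.2))
    (0, 0, 0)
  (st.2.1, st.2.2)

-- ===== PORT B =====
-- counts.append(c) loop of Source B: the running-count prefix-sum table
def ctCounts : List (Int × String) → Int → List Int
  | [], _ => []
  | (_, kind) :: rest, c =>
    let c' := c + (if kind == "start" then 1 else -1)
    c' :: ctCounts rest c'

def chooseTime_alt (times : List (Int × String)) (ystart : Int) (yend : Int) : Int × Int :=
  let counts := ctCounts times 0
  let window := (times.zip counts).filterMap
    (fun p => if ystart ≤ p.1.1 ∧ p.1.1 < yend then some (p.2, p.1.1) else none)
  let best := (PySem.List.max? (window.map Prod.fst) (fun x => x)).getD 0  -- max(..., default=0)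
  if best ≤ 0 then (0, 0)
  else
    -- next(t for cnt, t in window if cnt == best): always finds one here, so getD is never taken
    (best, ((window.find? (fun p => p.1 == best)).map Prod.snd).getD 0)

-- ===== PRECONDITION & SPEC =====
def Spec_chooseTime (times : List (Int × String)) (ystart : Int) (yend : Int) (out : Int × Int) : Prop := out = chooseTime_alt times ystart yend
instance (times : List (Int × String)) (ystart : Int) (yend : Int) (out : Int × Int) : Decidable (Spec_chooseTime times ystart yend out) := by unfold Spec_chooseTime; infer_instance

-- ===== CLAIM (what is proved, stated in full; the proofs are below) =====
def Claim_equal_chooseTime : Prop := ∀ (times : List (Int × String)) (ystart : Int) (yend : Int), Dom_chooseTime times ystart yend → Spec_chooseTime times ystart yend (chooseTime times ystart yend)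

-- ===== LEMMAS AND PROOFS =====

-- A's loop written as structural recursion (same steps as the foldl in the port)
def pickAll (ystart yend : Int) : List (Int × String) → Int → Int → Int → Int × Int
  | [], _, m, tm => (m, tm)
  | t :: rest, c, m, tm =>
    let c' := c + (if t.2 == "start" then 1 else -1)
    if c' > m ∧ (ystart ≤ t.1 ∧ t.1 < yend) then pickAll ystart yend rest c' c' t.1
    else pickAll ystart yend rest c' m tm

-- A's update logic restricted to the window pairs (cnt, t)
def pick : List (Int × Int) → Int → Int → Int × Int
  | [], m, tm => (m, tm)
  | (cnt, t) :: rest, m, tm =>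
    if cnt > m then pick rest cnt t else pick rest m tm

def win (ystart yend : Int) (l : List (Int × String)) (c : Int) : List (Int × Int) :=
  (l.zip (ctCounts l c)).filterMap
    (fun p => if ystart ≤ p.1.1 ∧ p.1.1 < yend then some (p.2, p.1.1) else none)

def bestOf (w : List (Int × Int)) (m : Int) : Int :=
  w.foldl (fun a p => max a p.1) m

lemma foldA_eq (ystart yend : Int) (l : List (Int × String)) (c m tm : Int) :
    (l.foldl
      (fun (s : Int × Int × Int) t =>
        let rcount := s.1 + (if t.2 == "start" then 1 else -1)
        if rcount > s.2.1 ∧ (ystart ≤ t.1 ∧ t.1 < yend) then (rcount, rcount, t.1)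
        else (rcount, s.2.1, s.2.2))
      (c, m, tm)).2 = pickAll ystart yend l c m tm := by
  induction l generalizing c m tm with
  | nil => rfl
  | cons t rest ih =>
    simp only [List.foldl_cons, pickAll]
    by_cases h : (c + (if t.2 == "start" then 1 else -1)) > m ∧ (ystart ≤ t.1 ∧ t.1 < yend)
    · rw [if_pos h, if_pos h]; exact ih _ _ _
    · rw [if_neg h, if_neg h]; exact ih _ _ _

lemma pickAll_eq_pick (ystart yend : Int) (l : List (Int × String)) (c m tm : Int) :
    pickAll ystart yend l c m tm = pick (win ystart yend l c) m tm := by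
  induction l generalizing c m tm with
  | nil => rfl
  | cons t rest ih =>
    obtain ⟨x, kind⟩ := t
    simp only [win, ctCounts] at ih ⊢
    simp only [pickAll, List.zip_cons_cons, List.filterMap_cons]
    by_cases hw : ystart ≤ x ∧ x < yend
    · simp only [hw, and_true, ite_true, pick]
      by_cases hc : c + (if kind == "start" then 1 else -1) > m
      · rw [if_pos hc, if_pos hc]; exact ih _ _ _
      · rw [if_neg hc, if_neg hc]; exact ih _ _ _
    · simp only [hw, and_false, ite_false]
      exact ih _ _ _

lemma le_bestOf (w : List (Int × Int)) (m : Int) : m ≤ bestOf w m := by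
  induction w generalizing m with
  | nil => simp [bestOf]
  | cons p rest ih =>
    simp only [bestOf, List.foldl_cons] at *
    exact le_trans (le_max_left m p.1) (ih (max m p.1))

lemma pick_eq (w : List (Int × Int)) (m tm : Int) :
    pick w m tm =
      if bestOf w m = m then (m, tm)
      else (bestOf w m, ((w.find? (fun p => p.1 == bestOf w m)).map Prod.snd).getD 0) := by
  induction w generalizing m tm with
  | nil => simp [pick, bestOf]
  | cons p rest ih =>
    obtain ⟨cnt, t⟩ := p
    have hb : bestOf ((cnt, t) :: rest) m = bestOf rest (max m cnt) := rfl
    by_cases hc : cnt > m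
    · have hmc : max m cnt = cnt := max_eq_right (le_of_lt hc)
      have hbc : cnt ≤ bestOf rest cnt := le_bestOf rest cnt
      simp only [pick, if_pos hc, ih, hb, hmc]
      by_cases he : bestOf rest cnt = cnt
      · have hne : ¬ bestOf rest cnt = m := by omega
        have hnm : ¬ cnt = m := by omega
        simp [he, hnm]
      · have hne : ¬ bestOf rest cnt = m := by omega
        have hnc : (cnt == bestOf rest cnt) = false := by
          simp; omega
        simp [he, hne, hnc]
    · have hmc : max m cnt = m := max_eq_left (by omega)
      have hbm : m ≤ bestOf rest m := le_bestOf rest m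
      simp only [pick, if_neg hc, ih, hb, hmc]
      by_cases he : bestOf rest m = m
      · simp [he]
      · have hnc : (cnt == bestOf rest m) = false := by
          simp [beq_iff_eq]; omega
        simp [he, List.find?_cons, hnc]

lemma bestOf_eq_foldl_max (w : List (Int × Int)) (m : Int) :
    bestOf w m = (w.map Prod.fst).foldl max m := by
  simp [bestOf, List.foldl_map]

lemma alt_eq_pick (times : List (Int × String)) (ystart yend : Int) :
    chooseTime_alt times ystart yend = pick (win ystart yend times 0) 0 0 := by
  rw [pick_eq]
  show (let window := win ystart yend times 0
        let best := (PySem.List.max? (window.map Prod.fst) (fun x => x)).getD 0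
        if best ≤ 0 then ((0 : Int), (0 : Int))
        else (best, ((window.find? (fun p => p.1 == best)).map Prod.snd).getD 0)) = _
  cases hw : win ystart yend times 0 with
  | nil =>
    have h0 : PySem.List.max? ([] : List Int) (fun x => x) = none := rfl
    simp [bestOf, h0]
  | cons p rest =>
    have hmax : PySem.List.max? ((p :: rest).map Prod.fst) (fun x => x)
        = some ((rest.map Prod.fst).foldl max p.1) := by
      simp [List.map_cons, PySem.List.max?_id_cons]
    have hbest : bestOf (p :: rest) 0 = max 0 ((rest.map Prod.fst).foldl max p.1) := by
      rw [bestOf_eq_foldl_max]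
      simp only [List.map_cons, List.foldl_cons]
      exact List.foldl_assoc (op := max) (l := rest.map Prod.fst) (a₁ := (0:Int)) (a₂ := p.1)
    set b := (rest.map Prod.fst).foldl max p.1 with hbdef
    simp only [hmax, Option.getD_some]
    by_cases hle : b ≤ 0
    · have : bestOf (p :: rest) 0 = 0 := by rw [hbest]; omega
      simp [hle, this]
    · have hbb : bestOf (p :: rest) 0 = b := by rw [hbest]; omega
      have hne : ¬ bestOf (p :: rest) 0 = 0 := by omega
      have hb0 : ¬ b = 0 := by omega
      simp [hle, hbb, hb0]

-- ===== VERDICT (by name: the statement is the Claim_ definition above) =====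
theorem chooseTime_spec : Claim_equal_chooseTime := by
  intro times ystart yend _
  show chooseTime times ystart yend = chooseTime_alt times ystart yend
  rw [alt_eq_pick, ← pickAll_eq_pick]
  show (times.foldl _ ((0:Int), (0:Int), (0:Int))).2 = _
  rw [foldA_eq]
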